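-- pv_equiv track=rewrite | github.com/haziq21/letter-boxed-solver | src/solver.py | get_prefix_dict
-- ===== SOURCE A (Python) =====
-- from collections.abc import Collection
--
-- def get_prefix_dict(words: Collection[str]) -> dict[str, set[str]]:
--     """
--     Create a dictionary mapping starting letters to words that start with that letter.
--     """
--     prefix_dict: dict[str, set[str]] = {}
--
--     for word in words:
--         prefix = word[0]
--
--         if prefix not in prefix_dict:
--             prefix_dict[prefix] = set()
--
--         prefix_dict[prefix].add(word)
--
--     return prefix_dict
-- ===== SOURCE B (Python) =====
-- def get_prefix_dict(words):
--     """
--     Create a dictionary mapping starting letters to words that start with that letter.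
--     """
--     letters = list(dict.fromkeys(w[0] for w in words))
--     return {c: {w for w in words if w[0] == c} for c in letters}
-- ===== Notes on version B (the rewrite author's own statement) =====
-- stated objective: alternative
-- what changed: Replaces the single-pass dict accumulation (check-insert-empty-set, then add) with a two-phase approach: first dedup the first letters in order of first occurrence, then build the whole dict in one comprehension, filtering the word list per letter.
import Mathlib
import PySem

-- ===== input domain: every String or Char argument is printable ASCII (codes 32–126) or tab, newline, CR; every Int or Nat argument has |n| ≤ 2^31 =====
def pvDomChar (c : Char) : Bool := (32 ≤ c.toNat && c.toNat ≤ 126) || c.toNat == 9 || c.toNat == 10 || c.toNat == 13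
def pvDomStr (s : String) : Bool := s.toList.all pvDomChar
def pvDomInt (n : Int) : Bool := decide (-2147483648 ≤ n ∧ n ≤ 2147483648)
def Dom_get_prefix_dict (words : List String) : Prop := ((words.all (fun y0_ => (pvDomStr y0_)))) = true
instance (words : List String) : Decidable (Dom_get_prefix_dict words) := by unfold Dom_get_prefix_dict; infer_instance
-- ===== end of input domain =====

-- B rebuilds the dict from a deduplicated list of first letters plus per-letter filtering, instead of A's
-- single-pass dict-of-sets accumulation; same result, no speed claim. A mutates nothing.

-- w[0] as a Python one-character string; on "" Python raises IndexError (excluded by Pre_), the ".getD" default is never reached there.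
def pyFirst (w : String) : String := ((PySem.Str.pyGet? w 0).map (fun c => String.ofList [c])).getD ""

-- ===== PORT A =====
-- A's loop body: 'pfx = word[0]; if pfx not in d: d[pfx] = set(); d[pfx].add(word)'
def stepA (d : PySem.Dict String (PySem.Set String)) (word : String) : PySem.Dict String (PySem.Set String) :=
  let pfx := pyFirst word
  let d := if d.contains pfx then d else d.insert pfx PySem.Set.empty
  d.modify pfx PySem.Set.empty (fun s => PySem.Set.add s word)

def get_prefix_dict (words : List String) : List (String × List String) :=
  (words.foldl stepA PySem.Dict.empty).items

-- ===== PORT B =====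
def get_prefix_dict_alt (words : List String) : List (String × List String) :=
  (PySem.List.dedup (words.map pyFirst)).map
    (fun c => (c, PySem.Set.ofList (words.filter (fun w => pyFirst w == c))))

-- ===== PRECONDITION & SPEC =====
-- Pre_ excludes lists containing the empty string, on which the Python A (and B) raise IndexError at word[0].
def Pre_get_prefix_dict (words : List String) : Prop := "" ∉ words
instance (words : List String) : Decidable (Pre_get_prefix_dict words) := by unfold Pre_get_prefix_dict; infer_instance
def pvWitness_get_prefix_dict : List String := ["apple", "ant", "bee", "ant"]

def Spec_get_prefix_dict (words : List String) (out : List (String × List String)) : Prop := out = get_prefix_dict_alt words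
instance (words : List String) (out : List (String × List String)) : Decidable (Spec_get_prefix_dict words out) := by unfold Spec_get_prefix_dict; infer_instance

-- ===== CLAIM (what is proved, stated in full; the proofs are below) =====
def Claim_equal_get_prefix_dict : Prop := ∀ (words : List String), Dom_get_prefix_dict words → Pre_get_prefix_dict words → Spec_get_prefix_dict words (get_prefix_dict words)

-- ===== LEMMAS AND PROOFS =====

theorem keys_stepA (d : PySem.Dict String (PySem.Set String)) (w : String) :
    (stepA d w).keys = PySem.Set.add d.keys (pyFirst w) := by
  unfold stepA
  by_cases h : d.contains (pyFirst w) = true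
  · simp only [h, if_true, PySem.Dict.keys_modify,
      PySem.Dict.keys_insert_of_contains _ _ h]
    rw [PySem.Set.add_of_mem]
    exact (PySem.Dict.contains_iff_mem_keys d (pyFirst w)).mp h
  · simp only [Bool.not_eq_true] at h
    simp only [h, Bool.false_eq_true, if_false, PySem.Dict.keys_modify]
    rw [PySem.Dict.keys_insert_of_contains _ _ (by simp), PySem.Dict.keys_insert_of_not_contains _ _ h,
      PySem.Set.add_of_not_mem]
    exact fun hm => by simp [(PySem.Dict.contains_iff_mem_keys d (pyFirst w)).mpr hm] at h

theorem keys_foldl_stepA (words : List String) (d : PySem.Dict String (PySem.Set String)) :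
    (words.foldl stepA d).keys = PySem.Set.update d.keys (words.map pyFirst) := by
  induction words generalizing d with
  | nil => rfl
  | cons w ws ih =>
    simp only [List.foldl_cons, List.map_cons, ih, keys_stepA]
    rfl

theorem getD_stepA (d : PySem.Dict String (PySem.Set String)) (w : String) (c : String) :
    (stepA d w).getD c [] =
      if pyFirst w = c then PySem.Set.add (d.getD c []) w else d.getD c [] := by
  simp only [stepA, PySem.Set.empty]
  by_cases h : d.contains (pyFirst w) = true
  · rw [if_pos h, PySem.Dict.getD_modify]
    by_cases hc : c = pyFirst w
    · subst hc; simp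
    · rw [if_neg hc, if_neg (fun hh => hc hh.symm)]
  · rw [if_neg h, PySem.Dict.getD_modify]
    by_cases hc : c = pyFirst w
    · subst hc
      rw [if_pos rfl, if_pos rfl, PySem.Dict.getD_insert_self,
        PySem.Dict.getD_of_not_contains _ _ (by simpa using h)]
    · rw [if_neg hc, if_neg (fun hh => hc hh.symm),
        PySem.Dict.getD_insert_of_ne _ _ _ hc]

theorem getD_foldl_stepA (words : List String) (d : PySem.Dict String (PySem.Set String)) (c : String) :
    (words.foldl stepA d).getD c [] =
      PySem.Set.update (d.getD c []) (words.filter (fun w => pyFirst w == c)) := by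
  induction words generalizing d with
  | nil => rfl
  | cons w ws ih =>
    simp only [List.foldl_cons, List.filter_cons, ih, getD_stepA]
    by_cases h : pyFirst w = c
    · simp only [h, beq_self_eq_true, if_true]
      rfl
    · simp only [if_neg h, beq_eq_false_iff_ne.mpr h]
      rfl

theorem nodup_keys_foldl_stepA (words : List String) :
    (words.foldl stepA PySem.Dict.empty).keys.Nodup := by
  rw [keys_foldl_stepA]
  have : PySem.Set.update (PySem.Dict.empty (κ := String) (ν := PySem.Set String)).keys
      (words.map pyFirst) = PySem.Set.ofList (words.map pyFirst) := rfl
  rw [this]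
  exact PySem.Set.nodup_ofList _

-- ===== VERDICT (by name: the statement is the Claim_ definition above) =====
theorem get_prefix_dict_spec : Claim_equal_get_prefix_dict := by
  intro words _ _
  unfold Spec_get_prefix_dict get_prefix_dict_alt
  unfold get_prefix_dict
  rw [    PySem.Dict.items_eq_map_keys _ (nodup_keys_foldl_stepA words) [],
    keys_foldl_stepA, PySem.List.dedup_eq_ofList]
  have hkeys : PySem.Set.update (PySem.Dict.empty (κ := String) (ν := PySem.Set String)).keys
      (words.map pyFirst) = PySem.Set.ofList (words.map pyFirst) := rfl
  rw [hkeys]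
  apply List.map_congr_left
  intro c _
  rw [getD_foldl_stepA]
  rfl
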